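-- pv_equiv track=rewrite | github.com/VicAraoz/Problemas | clase 12/problema-1.py | count_double_profiles
-- ===== SOURCE A (Python) =====
-- def count_double_profiles(n, m, friendships):
--     friendships_mapped_by_friend = {}
--
--     for a, b in friendships:
--         friendships_mapped_by_friend.setdefault(a, []).append(b)
--         friendships_mapped_by_friend.setdefault(b, []).append(a)
--
--
--     friendship_sets_count = {}
--
--     for friends_list in friendships_mapped_by_friend.values():
--         friend_set = frozenset(friends_list)
--         friendship_sets_count[friend_set] = friendship_sets_count.get(friend_set, 0) + 1
--
--     double_profiles = 0
--     for count in friendship_sets_count.values():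
--         if count > 1:
--             double_profiles += count - 1
--
--     return double_profiles
--     dic = {}
--     for i in range(1, n+1):
--         friendships[i]
-- ===== SOURCE B (Python) =====
-- def count_double_profiles(n, m, friendships):
--     # Dict-free brute force: recompute each user's friend set by scanning the
--     # edge list, and count a user whenever its friend set already occurred
--     # among earlier users (each duplicate group of size k yields k-1 hits).
--     users = []
--     for a, b in friendships:
--         if a not in users:
--             users.append(a)
--         if b not in users:
--             users.append(b)
--
--     def friends(u):
--         s = set()
--         for a, b in friendships:
--             if a == u:
--                 s.add(b)
--             if b == u:
--                 s.add(a)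
--         return s
--
--     count = 0
--     prev_sets = []
--     for u in users:
--         fs = friends(u)
--         if fs in prev_sets:
--             count += 1
--         prev_sets.append(fs)
--     return count
-- ===== Notes on version B (the rewrite author's own statement) =====
-- stated objective: alternative
-- what changed: B drops A's adjacency dictionary and friend-set tally entirely: it recomputes each user's friend set by a fresh scan of the edge list and counts a user when that set already occurred among earlier users (brute-force duplicate detection instead of hash-map grouping and count summation); it trades speed (O(u^2*m)) for having no dictionaries at all.
import Mathlib
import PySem

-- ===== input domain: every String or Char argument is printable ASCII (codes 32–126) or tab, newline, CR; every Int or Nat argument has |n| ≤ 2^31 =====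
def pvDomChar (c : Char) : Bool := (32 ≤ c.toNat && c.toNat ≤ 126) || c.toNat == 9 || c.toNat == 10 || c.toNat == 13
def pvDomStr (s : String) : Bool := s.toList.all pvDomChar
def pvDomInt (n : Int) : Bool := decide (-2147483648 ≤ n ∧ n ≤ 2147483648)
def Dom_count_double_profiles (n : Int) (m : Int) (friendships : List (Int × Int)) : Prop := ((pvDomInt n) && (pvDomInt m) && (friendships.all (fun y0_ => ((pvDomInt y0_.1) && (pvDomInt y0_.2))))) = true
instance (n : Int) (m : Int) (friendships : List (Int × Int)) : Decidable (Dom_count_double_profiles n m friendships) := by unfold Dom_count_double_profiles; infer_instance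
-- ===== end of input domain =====

-- B is dict-free: it recomputes each user's friend set by scanning the edge list and counts a user
-- whose friend set already occurred among earlier users (objective: alternative; not faster).

-- frozenset of an Int list as a canonical key: the sorted list of its distinct elements
-- (Python frozensets compare by set equality; the sorted distinct-element list is an exact key for that)
def pvCanon (xs : List Int) : List Int :=
  PySem.List.sorted (PySem.Set.ofList xs) (fun x => x) false

-- ===== PORT A =====
def count_double_profiles (n : Int) (m : Int) (friendships : List (Int × Int)) : Int :=
  let mapped : PySem.Dict Int (List Int) := friendships.foldl
    (fun d p => (d.modify p.1 [] (fun l => l ++ [p.2])).modify p.2 [] (fun l => l ++ [p.1]))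
    PySem.Dict.empty
  let counts : PySem.Dict (List Int) Int := mapped.values.foldl
    (fun c fl => c.modify (pvCanon fl) 0 (fun v => v + 1)) PySem.Dict.empty
  counts.values.foldl (fun acc cnt => if cnt > 1 then acc + (cnt - 1) else acc) 0

-- ===== PORT B =====
-- helper `friends(u)` of Source B: one scan of the edge list building a Python set
def pvFriends (friendships : List (Int × Int)) (u : Int) : PySem.Set Int :=
  friendships.foldl
    (fun s p =>
      let s1 := if p.1 == u then PySem.Set.add s p.2 else s
      if p.2 == u then PySem.Set.add s1 p.1 else s1)
    PySem.Set.empty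

def count_double_profiles_alt (n : Int) (m : Int) (friendships : List (Int × Int)) : Int :=
  let users : List Int := friendships.foldl
    (fun us p =>
      let u1 := if us.contains p.1 then us else us ++ [p.1]
      if u1.contains p.2 then u1 else u1 ++ [p.2])
    []
  (users.foldl
    (fun (st : List (PySem.Set Int) × Int) u =>
      let fs := pvFriends friendships u
      (st.1 ++ [fs], if st.1.any (fun p => PySem.Set.equal fs p) then st.2 + 1 else st.2))
    ([], 0)).2

-- ===== PRECONDITION & SPEC =====
def Spec_count_double_profiles (n : Int) (m : Int) (friendships : List (Int × Int)) (out : Int) : Prop := out = count_double_profiles_alt n m friendships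
instance (n : Int) (m : Int) (friendships : List (Int × Int)) (out : Int) : Decidable (Spec_count_double_profiles n m friendships out) := by unfold Spec_count_double_profiles; infer_instance

-- ===== CLAIM (what is proved, stated in full; the proofs are below) =====
def Claim_equal_count_double_profiles : Prop := ∀ (n : Int) (m : Int) (friendships : List (Int × Int)), Dom_count_double_profiles n m friendships → Spec_count_double_profiles n m friendships (count_double_profiles n m friendships)

-- ===== LEMMAS AND PROOFS =====

-- abbreviation for A's first fold (used only in the proofs)
def pvDictF (d : PySem.Dict Int (List Int)) (p : Int × Int) : PySem.Dict Int (List Int) :=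
  (d.modify p.1 [] (fun l => l ++ [p.2])).modify p.2 [] (fun l => l ++ [p.1])

-- one `setdefault/append` step keeps `users = keys` and keys nodup
theorem pvKeys_modify_step (d : PySem.Dict Int (List Int)) (k : Int) (f : List Int → List Int)
    (hnd : d.keys.Nodup) :
    (if d.keys.contains k then d.keys else d.keys ++ [k]) = (d.modify k [] f).keys ∧
      (d.modify k [] f).keys.Nodup := by
  rw [PySem.Dict.keys_modify]
  by_cases hc : d.contains k = true
  · have hm : k ∈ d.keys := (PySem.Dict.contains_iff_mem_keys d k).1 hc
    rw [PySem.Dict.keys_insert_of_contains _ _ hc]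
    simp [List.contains_iff_mem, hm, hnd]
  · have hm : k ∉ d.keys := fun h => hc ((PySem.Dict.contains_iff_mem_keys d k).2 h)
    rw [PySem.Dict.keys_insert_of_not_contains _ _ (by simpa using hc)]
    constructor
    · simp [List.contains_iff_mem, hm]

    · simp [List.nodup_append, hnd]
      exact fun x hx h => hm (h ▸ hx)

theorem pvUsers_keys (fr : List (Int × Int)) (us : List Int) (d : PySem.Dict Int (List Int))
    (h : us = d.keys) (hnd : d.keys.Nodup) :
    (fr.foldl
      (fun us p =>
        let u1 := if us.contains p.1 then us else us ++ [p.1]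
        if u1.contains p.2 then u1 else u1 ++ [p.2]) us)
      = (fr.foldl pvDictF d).keys ∧ (fr.foldl pvDictF d).keys.Nodup := by
  induction fr generalizing us d with
  | nil => exact ⟨h, hnd⟩
  | cons p t ih =>
    obtain ⟨h1, hnd1⟩ := pvKeys_modify_step d p.1 (fun l => l ++ [p.2]) hnd
    obtain ⟨h2, hnd2⟩ := pvKeys_modify_step _ p.2 (fun l => l ++ [p.1]) hnd1
    simp only [List.foldl_cons, pvDictF]
    apply ih
    · subst h
      rw [← h2, ← h1]
    · exact hnd2

-- Source B's `friends(u)` is the set of A's adjacency list of u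
theorem pvFriends_getD (fr : List (Int × Int)) (u : Int) (d : PySem.Dict Int (List Int))
    (s : PySem.Set Int) (h : s = PySem.Set.ofList (d.getD u [])) :
    (fr.foldl
      (fun s p =>
        let s1 := if p.1 == u then PySem.Set.add s p.2 else s
        if p.2 == u then PySem.Set.add s1 p.1 else s1) s)
      = PySem.Set.ofList ((fr.foldl pvDictF d).getD u []) := by
  induction fr generalizing d s with
  | nil => exact h
  | cons p t ih =>
    simp only [List.foldl_cons]
    apply ih
    subst h
    simp only [pvDictF, PySem.Dict.getD_modify]
    by_cases h1 : u = p.1 <;> by_cases h2 : u = p.2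
    · have hsplit : d.getD u [] ++ [u, u] = (d.getD u [] ++ [u]) ++ [u] := by simp
      simp only [← h1, ← h2, beq_self_eq_true, if_true, if_pos rfl, hsplit,
        PySem.Set.ofList_append_singleton]
    · simp [← h1, h2, PySem.Set.ofList_append_singleton,
        show ¬ (p.2 = u) from fun hh => h2 hh.symm]
    · simp [h1, ← h2, PySem.Set.ofList_append_singleton,
        show ¬ (p.1 = u) from fun hh => h1 hh.symm]
    · simp [h1, h2, show ¬ (p.1 = u) from fun hh => h1 hh.symm,
        show ¬ (p.2 = u) from fun hh => h2 hh.symm]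

-- Python `==` on two sets built with set() is equality of canonical sorted keys
theorem pvEqual_eq (l1 l2 : List Int) :
    PySem.Set.equal (PySem.Set.ofList l1) (PySem.Set.ofList l2)
      = decide (pvCanon l1 = pvCanon l2) := by
  by_cases h : pvCanon l1 = pvCanon l2
  · simp only [h, decide_true]
    refine (PySem.Set.equal_iff _ _).2 (fun x => ?_)
    unfold pvCanon at h
    constructor
    · intro hx
      have hx1 : x ∈ PySem.List.sorted (PySem.Set.ofList l1) (fun x => x) false :=
        (PySem.List.mem_sorted _ _ _ _).2 hx
      rw [h] at hx1
      exact (PySem.List.mem_sorted _ _ _ _).1 hx1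
    · intro hx
      have hx2 : x ∈ PySem.List.sorted (PySem.Set.ofList l2) (fun x => x) false :=
        (PySem.List.mem_sorted _ _ _ _).2 hx
      rw [← h] at hx2
      exact (PySem.List.mem_sorted _ _ _ _).1 hx2
  · simp only [h, decide_false]
    rw [Bool.eq_false_iff]
    intro he
    apply h
    have hmem := (PySem.Set.equal_iff _ _).1 he
    have hperm : (PySem.List.sorted (PySem.Set.ofList l1) (fun x => x) false).Perm
        (PySem.Set.ofList l2) :=
      (PySem.List.sorted_perm _ _ _).trans
        ((List.perm_ext_iff_of_nodup (PySem.Set.nodup_ofList l1)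
          (PySem.Set.nodup_ofList l2)).2 hmem)
    unfold pvCanon
    exact (PySem.List.sorted_eq_of_perm_of_pairwise_lt _ _ _ hperm
      (PySem.List.sorted_ofList_pairwise_lt l1)).symm

-- duplicate counter: number of elements of ys already seen (in pre or earlier in ys)
def pvDup (pre : List (List Int)) : List (List Int) → Int
  | [] => 0
  | y :: t => (if pre.contains y then 1 else 0) + pvDup (pre ++ [y]) t

theorem pvDup_eq (ys pre : List (List Int)) :
    pvDup pre ys = (ys.length : Int)
      - (((ys.foldl PySem.Set.add (PySem.Set.ofList pre)).length : Int)
          - ((PySem.Set.ofList pre).length : Int)) := by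
  induction ys generalizing pre with
  | nil => simp [pvDup]
  | cons y t ih =>
    have hstep : (y :: t).foldl PySem.Set.add (PySem.Set.ofList pre)
        = t.foldl PySem.Set.add (PySem.Set.ofList (pre ++ [y])) := by
      simp [PySem.Set.ofList_append_singleton]
    rw [pvDup, ih (pre ++ [y]), hstep]
    by_cases hy : y ∈ pre
    · have hof : PySem.Set.ofList (pre ++ [y]) = PySem.Set.ofList pre := by
        rw [PySem.Set.ofList_append_singleton,
          PySem.Set.add_of_mem (by simpa [PySem.Set.mem_ofList] using hy)]
      rw [hof]
      simp [List.contains_iff_mem, hy]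
      omega
    · have hof : PySem.Set.ofList (pre ++ [y]) = PySem.Set.ofList pre ++ [y] := by
        rw [PySem.Set.ofList_append_singleton,
          PySem.Set.add_of_not_mem (by simpa [PySem.Set.mem_ofList] using hy)]
      rw [hof]
      simp [List.contains_iff_mem, hy]
      omega

-- B's main loop counts duplicates of the canonical keys, via pvEqual_eq
theorem pvLoop (fr : List (Int × Int)) (ws processed : List Int) (c : Int) :
    (ws.foldl
      (fun (st : List (PySem.Set Int) × Int) u =>
        let fs := pvFriends fr u
        (st.1 ++ [fs], if st.1.any (fun p => PySem.Set.equal fs p) then st.2 + 1 else st.2))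
      (processed.map (fun w => PySem.Set.ofList ((fr.foldl pvDictF PySem.Dict.empty).getD w [])), c)).2
    = c + pvDup (processed.map (fun w => pvCanon ((fr.foldl pvDictF PySem.Dict.empty).getD w [])))
            (ws.map (fun w => pvCanon ((fr.foldl pvDictF PySem.Dict.empty).getD w []))) := by
  induction ws generalizing processed c with
  | nil => simp [pvDup]
  | cons u t ih =>
    have hfs : pvFriends fr u
        = PySem.Set.ofList ((fr.foldl pvDictF PySem.Dict.empty).getD u []) := by
      apply pvFriends_getD
      simp [PySem.Dict.getD_empty, PySem.Set.ofList, PySem.Set.empty]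
    simp only [List.foldl_cons, hfs]
    have hcond : ((processed.map (fun w => PySem.Set.ofList ((fr.foldl pvDictF PySem.Dict.empty).getD w []))).any
          (fun p => PySem.Set.equal (PySem.Set.ofList ((fr.foldl pvDictF PySem.Dict.empty).getD u [])) p))
        = ((processed.map (fun w => pvCanon ((fr.foldl pvDictF PySem.Dict.empty).getD w []))).contains
            (pvCanon ((fr.foldl pvDictF PySem.Dict.empty).getD u []))) := by
      simp only [List.any_map, List.contains_eq_any_beq]
      apply PySem.List.any_congr_mem
      intro w _
      simp only [Function.comp, pvEqual_eq, Bool.beq_eq_decide_eq]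
    rw [hcond]
    have happ : (processed.map (fun w => PySem.Set.ofList ((fr.foldl pvDictF PySem.Dict.empty).getD w [])))
          ++ [PySem.Set.ofList ((fr.foldl pvDictF PySem.Dict.empty).getD u [])]
        = (processed ++ [u]).map (fun w => PySem.Set.ofList ((fr.foldl pvDictF PySem.Dict.empty).getD w [])) := by
      simp
    rw [happ, ih (processed ++ [u])]
    simp only [List.map_cons, pvDup, List.map_append, List.map_cons, List.map_nil]
    split_ifs <;> simp_all <;> omega

theorem pvSum_sub_one (S : List (List Int)) (f : List Int → Int) :
    (S.map (fun k => f k - 1)).sum = (S.map f).sum - S.length := by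
  induction S with
  | nil => simp
  | cons x t ih => simp [ih]; ring

theorem pvCount_beq (x : List Int) (ks : List (List Int)) :
    @List.count _ List.instBEq x ks = @List.count _ instBEqOfDecidableEq x ks := by
  induction ks with
  | nil => rfl
  | cons h t ih => simp [List.count_cons, ih]

theorem pvSum_counts (ks : List (List Int)) :
    ((PySem.Set.ofList ks).map (fun k => (ks.count k : Int))).sum = (ks.length : Int) := by
  have hperm : (PySem.Set.ofList ks).Perm ks.dedup :=
    (List.perm_ext_iff_of_nodup (PySem.Set.nodup_ofList ks) ks.nodup_dedup).2
      (fun a => by simp [PySem.Set.mem_ofList, List.mem_dedup])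
  rw [(hperm.map _).sum_eq]
  have h2 : (ks.dedup.map (fun k => (ks.count k : Int))).sum =
      (((ks.dedup.map (fun k => ks.count k)).sum : Nat) : Int) := by
    rw [Nat.cast_list_sum, List.map_map]
    simp [Function.comp_def]
  rw [h2, List.map_congr_left (fun x _ => pvCount_beq x ks)]
  exact congrArg (fun t : Nat => (t : Int)) (List.sum_map_count_dedup_eq_length ks)

-- A's result is #users minus #distinct canonical keys
theorem pvA_eq (n mm : Int) (fr : List (Int × Int)) :
    count_double_profiles n mm fr
      = (((fr.foldl pvDictF PySem.Dict.empty).values.map pvCanon).length : Int)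
        - ((PySem.Set.ofList ((fr.foldl pvDictF PySem.Dict.empty).values.map pvCanon)).length : Int) := by
  unfold count_double_profiles pvDictF
  set mapd := fr.foldl
    (fun d p => (d.modify p.1 [] (fun l => l ++ [p.2])).modify p.2 [] (fun l => l ++ [p.1]))
    PySem.Dict.empty with hmapd
  set ks : List (List Int) := mapd.values.map pvCanon with hks
  have hcounts : mapd.values.foldl (fun c fl => c.modify (pvCanon fl) 0 (fun v => v + 1))
      PySem.Dict.empty = PySem.Dict.counter ks := by
    rw [PySem.Dict.counter_eq_foldl, hks, List.foldl_map]
  simp only [hcounts]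
  have hvals : (PySem.Dict.counter ks).values =
      (PySem.Set.ofList ks).map (fun k => (ks.count k : Int)) := by
    simp [PySem.Dict.values, PySem.Dict.items_counter, List.map_map]
  rw [hvals]
  rw [PySem.List.foldl_congr_mem _ _ (fun acc cnt => acc + (cnt - 1)) 0 (by
    intro acc cnt hcnt
    rcases List.mem_map.1 hcnt with ⟨k, hkmem, rfl⟩
    have h1 : 0 < ks.count k := List.count_pos_iff.2 ((PySem.Set.mem_ofList ks k).1 hkmem)
    have h1' : (1 : Int) ≤ (ks.count k : Int) := by exact_mod_cast h1
    split_ifs with h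
    · rfl
    · show acc = acc + ((ks.count k : Int) - 1)
      omega)]
  rw [PySem.List.foldl_add _ (fun cnt => cnt - 1) 0, List.map_map]
  have hsub := pvSum_sub_one (PySem.Set.ofList ks) (fun k => (ks.count k : Int))
  simp only [Function.comp_def] at *
  rw [hsub, pvSum_counts]
  omega

-- ===== VERDICT (by name: the statement is the Claim_ definition above) =====
theorem count_double_profiles_spec : Claim_equal_count_double_profiles := by
  intro n m fr _
  unfold Spec_count_double_profiles count_double_profiles_alt
  obtain ⟨husers, hnd⟩ := pvUsers_keys fr [] PySem.Dict.empty rfl (by simp [PySem.Dict.keys_empty])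
  simp only [husers]
  have hloop := pvLoop fr ((fr.foldl pvDictF PySem.Dict.empty).keys) [] 0
  simp only [List.map_nil] at hloop
  rw [hloop, pvA_eq n m fr, pvDup_eq]
  have hks : (fr.foldl pvDictF PySem.Dict.empty).values.map pvCanon
      = (fr.foldl pvDictF PySem.Dict.empty).keys.map
          (fun w => pvCanon ((fr.foldl pvDictF PySem.Dict.empty).getD w [])) := by
    rw [PySem.Dict.values_eq_map_keys _ hnd [], List.map_map]
    rfl
  rw [hks]
  simp [← PySem.Set.ofList_eq_foldl]
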